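-- pv_equiv track=rewrite | github.com/Wwstarry/Introduction-to-Information-Security | MultithreadingOfAES.py | divide_task
-- ===== SOURCE A (Python) =====
-- def divide_task(num_segments):
--     start = 0
--     end = 1023  # 10-bit DES keys
--     if num_segments <= 0:
--         return []
--     segment_size = (end - start + 1) // num_segments
--     segments = []
--     current_start = start
--     for i in range(num_segments):
--         current_end = current_start + segment_size - 1
--         if i == num_segments - 1:
--             current_end = end  # 确保最后一个段到达范围末端
--         start_binary = format(current_start, '010b')
--         end_binary = format(current_end, '010b')
--         segments.append((start_binary, end_binary))
--         current_start = current_end + 1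
--     return segments
-- ===== SOURCE B (Python) =====
-- def divide_task(num_segments):
--     if num_segments <= 0:
--         return []
--     segment_size = 1024 // num_segments
--     bounds = [i * segment_size for i in range(num_segments)] + [1024]
--     return [(format(a, '010b'), format(b - 1, '010b'))
--             for a, b in zip(bounds, bounds[1:])]
-- ===== Notes on version B (the rewrite author's own statement) =====
-- stated objective: alternative
-- what changed: B is a staged two-pass: it first materialises the list of segment boundaries [0, s, 2s, ..., 1024] (the end sentinel 1024 replaces A's last-iteration special case) and then pairs adjacent boundaries with zip, formatting (a, b-1); no current_start accumulator and no last-index branch are threaded through a loop.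
import Mathlib
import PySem

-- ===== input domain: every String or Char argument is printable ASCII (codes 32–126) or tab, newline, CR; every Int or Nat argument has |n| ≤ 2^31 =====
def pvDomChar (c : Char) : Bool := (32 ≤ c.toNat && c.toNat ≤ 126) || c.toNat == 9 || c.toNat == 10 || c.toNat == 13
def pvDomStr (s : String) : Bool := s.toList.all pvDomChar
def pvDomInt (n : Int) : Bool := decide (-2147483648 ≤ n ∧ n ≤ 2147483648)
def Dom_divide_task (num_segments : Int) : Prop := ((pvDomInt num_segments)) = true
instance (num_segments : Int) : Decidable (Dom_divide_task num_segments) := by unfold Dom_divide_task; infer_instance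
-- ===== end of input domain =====

-- B is a staged two-pass (boundary list [0, s, 2s, ..., 1024], then adjacent-pair zip) instead of
-- A's single loop threading a current_start accumulator with a last-index branch; no speed claim.

-- format(n, '010b'): binary digits zero-padded to width 10, sign in front (exact via PySem)
def fmt010b (n : Int) : String := PySem.Str.zfill (PySem.Int.toBin n) 10

-- ===== PORT A =====
def divide_task (num_segments : Int) : List (String × String) :=
  if num_segments ≤ 0 then []
  else
    let segment_size := PySem.Int.floordiv (1023 - 0 + 1) num_segments
    let st :=
      (PySem.List.pyRange 0 num_segments 1).foldl
        (fun (st : List (String × String) × Int) i =>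
          let current_end := st.2 + segment_size - 1
          let current_end := if i = num_segments - 1 then (1023 : Int) else current_end
          (st.1 ++ [(fmt010b st.2, fmt010b current_end)], current_end + 1))
        ([], 0)
    st.1

-- ===== PORT B =====
-- bounds[1:] is ported as .tail: bounds is nonempty (it ends with the literal 1024), where drop 1 = tail.
def divide_task_alt (num_segments : Int) : List (String × String) :=
  if num_segments ≤ 0 then []
  else
    let segment_size := PySem.Int.floordiv 1024 num_segments
    let bounds := (PySem.List.pyRange 0 num_segments 1).map (fun i => i * segment_size) ++ [1024]
    (List.zip bounds bounds.tail).map (fun p => (fmt010b p.1, fmt010b (p.2 - 1)))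

-- ===== PRECONDITION & SPEC =====
def Spec_divide_task (num_segments : Int) (out : List (String × String)) : Prop := out = divide_task_alt num_segments
instance (num_segments : Int) (out : List (String × String)) : Decidable (Spec_divide_task num_segments out) := by unfold Spec_divide_task; infer_instance

-- ===== CLAIM =====
def Claim_equal_divide_task : Prop := ∀ (num_segments : Int), Dom_divide_task num_segments → Spec_divide_task num_segments (divide_task num_segments)

-- ===== LEMMAS AND PROOFS =====

-- Common closed form both sides are reduced to.
def closedPair (ns seg i : Int) : String × String :=
  (fmt010b (i * seg), fmt010b (if i = ns - 1 then (1023 : Int) else (i + 1) * seg - 1))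

-- A-side loop invariant: starting A's loop at index a with current_start = a*seg produces the
-- closed-form pairs for indices a..ns-1, appended to the accumulator.
lemma divide_loop (ns seg : Int) (k : Nat) :
    ∀ (a : Int) (acc : List (String × String)), ns - a = (k : Int) →
    ((PySem.List.pyRange a ns 1).foldl
        (fun (st : List (String × String) × Int) i =>
          let current_end := st.2 + seg - 1
          let current_end := if i = ns - 1 then (1023 : Int) else current_end
          (st.1 ++ [(fmt010b st.2, fmt010b current_end)], current_end + 1))
        (acc, a * seg)).1
      = acc ++ (PySem.List.pyRange a ns 1).map (closedPair ns seg) := by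
  induction k with
  | zero =>
      intro a acc h
      rw [PySem.List.pyRange_one_eq_nil (by omega)]
      simp
  | succ k ih =>
      intro a acc h
      rw [PySem.List.pyRange_one_cons (by omega)]
      simp only [List.foldl_cons, List.map_cons]
      by_cases hlast : a = ns - 1
      · have : ns ≤ a + 1 := by omega
        rw [PySem.List.pyRange_one_eq_nil this]
        simp [hlast, closedPair]
      · have hstep : a * seg + seg - 1 + 1 = (a + 1) * seg := by ring
        simp only [hlast, if_false]
        rw [hstep]
        have := ih (a + 1) (acc ++ [(fmt010b (a * seg), fmt010b (a * seg + seg - 1))]) (by omega)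
        simp only [this, List.append_assoc, List.cons_append, List.nil_append]
        have hce : a * seg + seg - 1 = (a + 1) * seg - 1 := by ring
        simp [closedPair, hlast, hce]

-- B-side: zipping the boundary list with its tail yields the same closed-form pairs.
lemma zip_bounds (ns seg : Int) (k : Nat) :
    ∀ (a : Int), ns - a = (k : Int) →
    (List.zip ((PySem.List.pyRange a ns 1).map (fun i => i * seg) ++ [1024])
              (((PySem.List.pyRange a ns 1).map (fun i => i * seg) ++ [1024]).tail)).map
        (fun p => (fmt010b p.1, fmt010b (p.2 - 1)))
      = (PySem.List.pyRange a ns 1).map (closedPair ns seg) := by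
  induction k with
  | zero =>
      intro a h
      rw [PySem.List.pyRange_one_eq_nil (by omega)]
      simp
  | succ k ih =>
      intro a h
      rw [PySem.List.pyRange_one_cons (by omega)]
      by_cases hlast : a = ns - 1
      · have : ns ≤ a + 1 := by omega
        rw [PySem.List.pyRange_one_eq_nil this]
        simp [closedPair, hlast]
      · have hne : ns - (a + 1) = (k : Int) := by omega
        have hpos : a + 1 < ns := by omega
        rw [PySem.List.pyRange_one_cons hpos]
        have := ih (a + 1) hne
        rw [PySem.List.pyRange_one_cons hpos] at this
        simp only [List.map_cons, List.cons_append, List.tail_cons, List.zip_cons_cons] at this ⊢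
        rw [this]
        simp [closedPair, hlast]

theorem divide_task_eq_aux : ∀ (num_segments : Int),
    divide_task num_segments = divide_task_alt num_segments := by
  intro ns
  unfold divide_task divide_task_alt
  by_cases h : ns ≤ 0
  · simp [h]
  · simp only [if_neg h]
    have h0 : ns - 0 = ((ns.toNat : Nat) : Int) := by omega
    have hA := divide_loop ns (PySem.Int.floordiv (1023 - 0 + 1) ns) ns.toNat 0 [] h0
    have hB := zip_bounds ns (PySem.Int.floordiv 1024 ns) ns.toNat 0 h0
    norm_num at hA hB ⊢
    rw [hA, hB]

-- ===== VERDICT =====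
theorem divide_task_spec : Claim_equal_divide_task := by
  intro ns _
  exact divide_task_eq_aux ns
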